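-- pv_equiv track=rewrite | github.com/weselyj/Clarity-OMR-Train-RADIO | src/pipeline/post_decode.py | split_system_tokens_into_staves
-- ===== SOURCE A (Python) =====
-- from typing import List, Optional, Sequence
--
-- _STAFF_START = "<staff_start>"
--
-- _STAFF_END = "<staff_end>"
--
-- def split_system_tokens_into_staves(tokens: Sequence[str]) -> List[List[str]]:
--     """Split a per-system token list at ``<staff_start>...<staff_end>`` boundaries.
--
--     Returns one inner list per staff, INCLUDING the ``<staff_start>`` and
--     ``<staff_end>`` markers. Anything outside a staff block (eg. a leading
--     ``<bos>``, a trailing ``<eos>``, or a stray token between blocks) is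
--     dropped because the rejoin logic expects each chunk to be a complete
--     staff. If the decoder omitted ``<staff_end>`` for the final staff, the
--     chunk extends to the end of the token list and is still returned.
--
--     The function tolerates malformed input rather than raising — it is a
--     diagnostic preprocessor, not a strict validator.
--     """
--     chunks: List[List[str]] = []
--     i = 0
--     n = len(tokens)
--     while i < n:
--         if tokens[i] != _STAFF_START:
--             i += 1
--             continue
--         end = i + 1
--         while end < n and tokens[end] != _STAFF_END:
--             end += 1
--         if end < n:
--             chunks.append(list(tokens[i : end + 1]))
--             i = end + 1
--         else:
--             # No <staff_end> found — assume the rest of the stream is this staff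
--             chunks.append(list(tokens[i:]))
--             break
--     return chunks
-- ===== SOURCE B (Python) =====
-- _STAFF_START = "<staff_start>"
-- _STAFF_END = "<staff_end>"
--
-- def split_system_tokens_into_staves(tokens):
--     chunks = []
--     current = None
--     for tok in tokens:
--         if current is None:
--             if tok == _STAFF_START:
--                 current = [tok]
--         else:
--             current.append(tok)
--             if tok == _STAFF_END:
--                 chunks.append(current)
--                 current = None
--     if current is not None:
--         chunks.append(current)
--     return chunks
-- ===== Notes on version B (the rewrite author's own statement) =====
-- stated objective: simpler
-- what changed: Replaced the index-based while loop with an inner scan for <staff_end> by a single flat pass over the tokens maintaining an 'inside a staff' accumulator, flushing the partial chunk after the loop.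
import Mathlib
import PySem

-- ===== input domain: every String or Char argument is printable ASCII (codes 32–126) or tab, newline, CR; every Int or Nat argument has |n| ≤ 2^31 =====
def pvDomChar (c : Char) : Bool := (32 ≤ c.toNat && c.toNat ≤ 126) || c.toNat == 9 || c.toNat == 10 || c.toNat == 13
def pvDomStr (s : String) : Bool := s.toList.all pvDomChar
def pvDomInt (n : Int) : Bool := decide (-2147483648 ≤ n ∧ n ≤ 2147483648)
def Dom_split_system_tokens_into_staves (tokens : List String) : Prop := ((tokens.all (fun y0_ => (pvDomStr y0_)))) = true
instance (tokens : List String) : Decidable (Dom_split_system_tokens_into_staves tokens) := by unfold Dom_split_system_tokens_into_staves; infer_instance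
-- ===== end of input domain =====

-- B replaces A's index-based while loop (with an inner scan for "<staff_end>") by one flat
-- pass keeping an optional current-chunk accumulator; objective: simpler. Return values only.

-- ===== PORT A =====
-- inner while loop: 'while end < n and tokens[end] != _STAFF_END: end += 1'
def pvFindEnd (tokens : List String) (e : Nat) : Nat :=
  if h : e < tokens.length then
    if tokens[e]! ≠ "<staff_end>" then pvFindEnd tokens (e + 1) else e
  else e
termination_by tokens.length - e

-- outer while loop over index i, 'chunks' threaded as the accumulator
def pvOuterA (tokens : List String) (i : Nat) (chunks : List (List String)) :
    List (List String) :=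
  if h : i < tokens.length then
    if tokens[i]! ≠ "<staff_start>" then pvOuterA tokens (i + 1) chunks
    else
      let e := pvFindEnd tokens (i + 1)
      if e < tokens.length then
        pvOuterA tokens (e + 1)
          (chunks ++ [PySem.List.slice tokens (some (i : Int)) (some ((e : Int) + 1))])
      else chunks ++ [PySem.List.slice tokens (some (i : Int)) none]   -- break
  else chunks
termination_by tokens.length - i
decreasing_by
  · omega
  · have : i + 1 ≤ pvFindEnd tokens (i + 1) := by
      clear_value e
      generalize hj : i + 1 = j
      have : j ≤ pvFindEnd tokens j := by
        clear hj
        fun_induction pvFindEnd tokens j with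
        | case1 j hlt hne ih => omega
        | case2 j hlt hne => omega
        | case3 j hlt => omega
      omega
    omega

def split_system_tokens_into_staves (tokens : List String) : List (List String) :=
  pvOuterA tokens 0 []

-- ===== PORT B =====
def pvStepB (s : List (List String) × Option (List String)) (tok : String) :
    List (List String) × Option (List String) :=
  match s with
  | (chunks, none) =>
      if tok = "<staff_start>" then (chunks, some [tok]) else (chunks, none)
  | (chunks, some cur) =>
      let cur' := cur ++ [tok]
      if tok = "<staff_end>" then (chunks ++ [cur'], none) else (chunks, some cur')

def pvFinishB (s : List (List String) × Option (List String)) : List (List String) :=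
  match s with
  | (chunks, none) => chunks
  | (chunks, some cur) => chunks ++ [cur]

def split_system_tokens_into_staves_alt (tokens : List String) : List (List String) :=
  pvFinishB (tokens.foldl pvStepB ([], none))

-- ===== PRECONDITION & SPEC =====
def Spec_split_system_tokens_into_staves (tokens : List String) (out : List (List String)) : Prop := out = split_system_tokens_into_staves_alt tokens
instance (tokens : List String) (out : List (List String)) : Decidable (Spec_split_system_tokens_into_staves tokens out) := by unfold Spec_split_system_tokens_into_staves; infer_instance

-- ===== CLAIM (what is proved, stated in full; the proofs are below) =====
def Claim_equal_split_system_tokens_into_staves : Prop := ∀ (tokens : List String), Dom_split_system_tokens_into_staves tokens → Spec_split_system_tokens_into_staves tokens (split_system_tokens_into_staves tokens)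

-- ===== LEMMAS AND PROOFS =====

-- canonical mutual description of the split, the bridge between the two ports
mutual
def pvCanon : List String → List (List String)
  | [] => []
  | t :: rest => if t = "<staff_start>" then pvScan [t] rest else pvCanon rest

def pvScan (acc : List String) : List String → List (List String)
  | [] => [acc]
  | t :: rest =>
      if t = "<staff_end>" then (acc ++ [t]) :: pvCanon rest
      else pvScan (acc ++ [t]) rest
end

theorem pvFindEnd_ge (tokens : List String) (j : Nat) : j ≤ pvFindEnd tokens j := by
  fun_induction pvFindEnd tokens j with
  | case1 j hlt hne ih => omega
  | case2 j hlt hne => omega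
  | case3 j hlt => omega

theorem drop_eq_cons (tokens : List String) (i : Nat) (h : i < tokens.length) :
    tokens.drop i = tokens[i]! :: tokens.drop (i + 1) := by
  rw [List.getElem!_eq_getElem?_getD, List.getElem?_eq_getElem h]
  exact List.drop_eq_getElem_cons h

-- scanning from index j with accumulator acc = the canonical pvScan on the suffix
theorem pvScan_eq (tokens : List String) (j : Nat) (acc : List String) :
    pvScan acc (tokens.drop j) =
      if pvFindEnd tokens j < tokens.length then
        (acc ++ (tokens.drop j).take (pvFindEnd tokens j + 1 - j)) ::
          pvCanon (tokens.drop (pvFindEnd tokens j + 1))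
      else [acc ++ tokens.drop j] := by
  fun_induction pvFindEnd tokens j generalizing acc with
  | case1 j hlt hne ih =>
      rw [drop_eq_cons tokens j hlt, pvScan]
      simp only [if_neg hne]
      rw [ih]
      have hj1 : j + 1 ≤ pvFindEnd tokens (j + 1) := pvFindEnd_ge tokens (j + 1)
      split
      · have : pvFindEnd tokens (j + 1) + 1 - j = (pvFindEnd tokens (j + 1) + 1 - (j + 1)) + 1 := by omega
        rw [this, List.take_succ_cons]
        simp
      · simp
  | case2 j hlt hne =>
      rw [drop_eq_cons tokens j hlt, pvScan]
      simp only [ne_eq, not_not] at hne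
      simp only [if_pos hne, if_pos hlt]
      have : j + 1 - j = 0 + 1 := by omega
      rw [this, List.take_succ_cons, List.take_zero]
  | case3 j hlt =>
      have hdrop : tokens.drop j = [] := List.drop_eq_nil_of_le (by omega)
      rw [hdrop, pvScan]
      simp [hlt]

-- the outer index loop of A computes pvCanon on the suffix, prepended with the accumulator
theorem pvOuterA_eq (tokens : List String) (i : Nat) (chunks : List (List String)) :
    pvOuterA tokens i chunks = chunks ++ pvCanon (tokens.drop i) := by
  fun_induction pvOuterA tokens i chunks with
  | case1 i chunks hlt hne ih =>
      rw [ih, drop_eq_cons tokens i hlt, pvCanon, if_neg hne]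
  | case2 i chunks hlt hne e helt ih =>
      simp only [ne_eq, not_not] at hne
      rw [ih, drop_eq_cons tokens i hlt, pvCanon, if_pos hne]
      rw [pvScan_eq tokens (i + 1) [tokens[i]!]]
      have hge := pvFindEnd_ge tokens (i + 1)
      simp only [show e = pvFindEnd tokens (i+1) from rfl] at helt ⊢
      rw [if_pos helt]
      have hcast : PySem.List.slice tokens (some (i : Int)) (some ((e : Int) + 1))
          = (tokens.drop i).take (e + 1 - i) := by
        have : ((e : Int) + 1) = ((e + 1 : Nat) : Int) := by push_cast; ring
        rw [this, PySem.List.slice_natCast]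
      simp only [show e = pvFindEnd tokens (i+1) from rfl] at hcast
      rw [hcast, drop_eq_cons tokens i hlt]
      have : pvFindEnd tokens (i + 1) + 1 - i = (pvFindEnd tokens (i + 1) + 1 - (i + 1)) + 1 := by omega
      rw [this, List.take_succ_cons]
      simp
  | case3 i chunks hlt hne e helt =>
      simp only [ne_eq, not_not] at hne
      rw [drop_eq_cons tokens i hlt, pvCanon, if_pos hne]
      rw [pvScan_eq tokens (i + 1) [tokens[i]!]]
      simp only [show e = pvFindEnd tokens (i+1) from rfl] at helt
      rw [if_neg helt]
      rw [PySem.List.slice_from_natCast, drop_eq_cons tokens i hlt]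
      simp
  | case4 i chunks hge =>
      have : tokens.drop i = [] := List.drop_eq_nil_of_le (by omega)
      rw [this, pvCanon]; simp

-- B's fold, characterised in both states, by one simultaneous induction
theorem pvFoldB_eq (ts : List String) :
    (∀ chunks, pvFinishB (ts.foldl pvStepB (chunks, none)) = chunks ++ pvCanon ts) ∧
    (∀ chunks cur, pvFinishB (ts.foldl pvStepB (chunks, some cur)) = chunks ++ pvScan cur ts) := by
  induction ts with
  | nil => constructor <;> intros <;> simp [pvFinishB, pvCanon, pvScan]
  | cons t rest ih =>
      refine ⟨fun chunks => ?_, fun chunks cur => ?_⟩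
      · rw [List.foldl_cons, pvCanon]
        by_cases h : t = "<staff_start>"
        · simp [pvStepB, h, ih.2]
        · simp [pvStepB, h, ih.1]
      · rw [List.foldl_cons, pvScan]
        by_cases h : t = "<staff_end>"
        · simp [pvStepB, h, ih.1]
        · simp [pvStepB, h, ih.2]

-- ===== VERDICT (by name: the statement is the Claim_ definition above) =====
theorem split_system_tokens_into_staves_spec : Claim_equal_split_system_tokens_into_staves := by
  intro tokens _
  unfold Spec_split_system_tokens_into_staves
  unfold split_system_tokens_into_staves split_system_tokens_into_staves_alt
  rw [pvOuterA_eq, (pvFoldB_eq tokens).1 []]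
  simp
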